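-- pv_equiv track=rewrite | github.com/pganssle/audio-feeder | src/audio_feeder/schema_handler.py | _split_type_arguments
-- ===== SOURCE A (Python) =====
-- import typing
--
-- def _split_type_arguments(arguments: str) -> typing.Iterable[str]:
--     bracket_level = 0
--     split_point = -1
--     for i, c in enumerate(arguments):
--         if c == "[":
--             bracket_level += 1
--         elif c == "]":
--             bracket_level -= 1
--
--         if c == "," and bracket_level == 0:
--             yield arguments[split_point + 1 : i].strip()
--             split_point = i
--
--     yield arguments[split_point + 1 :].strip()
-- ===== SOURCE B (Python) =====
-- import typing
--
-- def _split_type_arguments(arguments: str) -> typing.Iterable[str]: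
--     # Accumulate the characters of the current segment instead of tracking
--     # slice indices: on each top-level comma, emit the joined buffer stripped.
--     bracket_level = 0
--     current: list = []
--     for c in arguments:
--         if c == "[":
--             bracket_level += 1
--         elif c == "]":
--             bracket_level -= 1
--         if c == "," and bracket_level == 0:
--             yield "".join(current).strip()
--             current = []
--         else:
--             current.append(c)
--     yield "".join(current).strip()
-- ===== Notes on version B (the rewrite author's own statement) =====
-- stated objective: alternative
-- what changed: B builds each segment character-by-character in a buffer and emits the joined buffer on every top-level comma, instead of A's enumerate-and-slice-by-index approach (no enumerate, no index arithmetic, no slicing).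
import Mathlib
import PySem

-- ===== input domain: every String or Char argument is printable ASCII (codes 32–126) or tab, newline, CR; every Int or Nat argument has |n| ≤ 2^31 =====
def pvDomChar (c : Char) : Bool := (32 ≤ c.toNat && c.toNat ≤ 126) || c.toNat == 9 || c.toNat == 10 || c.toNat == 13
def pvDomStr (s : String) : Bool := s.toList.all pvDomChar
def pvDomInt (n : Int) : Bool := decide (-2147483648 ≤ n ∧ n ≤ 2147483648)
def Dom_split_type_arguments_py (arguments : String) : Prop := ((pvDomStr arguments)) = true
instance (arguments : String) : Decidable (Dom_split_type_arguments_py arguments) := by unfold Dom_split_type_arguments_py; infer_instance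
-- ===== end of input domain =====

-- B accumulates each segment's characters in a buffer and emits the joined buffer at every
-- top-level comma, instead of A's enumerate-and-slice-by-index loop; alternative decomposition, same cost.


-- ===== PORT A =====
-- A's loop body: update bracket_level, and on a top-level comma emit the stripped
-- slice since the previous split point and move the split point.
def pvStepA (s : String) (st : Int × Int × List String) (ic : Int × Char) : Int × Int × List String :=
  let lvl := if ic.2 = '[' then st.1 + 1 else if ic.2 = ']' then st.1 - 1 else st.1
  if ic.2 = ',' ∧ lvl = 0 then
    (lvl, ic.1, st.2.2 ++ [PySem.Str.strip (PySem.Str.slice s (some (st.2.1 + 1)) (some ic.1))])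
  else (lvl, st.2.1, st.2.2)

def split_type_arguments_py (arguments : String) : List String :=
  let r := (PySem.List.enumerate arguments.toList).foldl (pvStepA arguments) (0, -1, [])
  r.2.2 ++ [PySem.Str.strip (PySem.Str.slice arguments (some (r.2.1 + 1)) none)]

-- ===== PORT B =====
-- B's loop as structural recursion: bracket level and the buffer of the current
-- segment's characters; a top-level comma emits "".join(current).strip() and resets the buffer.
def pvGoB (lvl : Int) (cur : List Char) : List Char → List String
  | [] => [PySem.Str.strip (String.ofList cur)]
  | c :: rest =>
    let lvl' := if c = '[' then lvl + 1 else if c = ']' then lvl - 1 else lvl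
    if c = ',' ∧ lvl' = 0 then PySem.Str.strip (String.ofList cur) :: pvGoB lvl' [] rest
    else pvGoB lvl' (cur ++ [c]) rest

def split_type_arguments_py_alt (arguments : String) : List String :=
  pvGoB 0 [] arguments.toList

-- ===== PRECONDITION & SPEC =====
def Spec_split_type_arguments_py (arguments : String) (out : List String) : Prop := out = split_type_arguments_py_alt arguments
instance (arguments : String) (out : List String) : Decidable (Spec_split_type_arguments_py arguments out) := by unfold Spec_split_type_arguments_py; infer_instance

-- ===== CLAIM (what is proved, stated in full; the proofs are below) =====
def Claim_equal_split_type_arguments_py : Prop := ∀ (arguments : String), Dom_split_type_arguments_py arguments → Spec_split_type_arguments_py arguments (split_type_arguments_py arguments)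

-- ===== LEMMAS AND PROOFS =====

-- empty slice: s[a:a] has no characters
lemma pvSliceEmpty (s : String) (a : Int) (ha : 0 ≤ a) :
    (PySem.Str.slice s (some a) (some a)).toList = [] := by
  simp only [pysem]
  rw [PySem.List.slice_toNat s.toList ha ha]
  simp

-- extending a slice by one character: s[a:i+1] = s[a:i] + [s[i]]
lemma pvSliceExtend (s : String) (a : Int) (i : Nat) (c : Char) (rest : List Char)
    (hdrop : s.toList.drop i = c :: rest) (ha : 0 ≤ a) (hai : a ≤ (i : Int)) :
    (PySem.Str.slice s (some a) (some ((i : Int) + 1))).toList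
      = (PySem.Str.slice s (some a) (some (i : Int))).toList ++ [c] := by
  have hi : s.toList[i]? = some c := by
    have : (List.drop i s.toList)[0]? = s.toList[i + 0]? := List.getElem?_drop
    simpa [hdrop] using this.symm
  simp only [pysem]
  rw [PySem.List.slice_toNat s.toList ha (by omega : (0:Int) ≤ (i:Int) + 1), PySem.List.slice_toNat s.toList ha (by omega : (0:Int) ≤ (i:Int))]
  have h1 : ((i : Int) + 1).toNat = i + 1 := by omega
  have h2 : ((i : Int)).toNat = i := by omega
  have h3 : a.toNat ≤ i := by omega
  rw [h1, h2, show i + 1 - a.toNat = (i - a.toNat) + 1 by omega, List.take_add_one]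
  have h4 : (s.toList.drop a.toNat)[i - a.toNat]? = some c := by
    rw [List.getElem?_drop, show a.toNat + (i - a.toNat) = i by omega]
    exact hi
  rw [h4]
  rfl

-- past-the-end slice bound equals slicing to the end
lemma pvSliceEnd (s : String) (a : Int) (i : Nat) (ha : 0 ≤ a)
    (hlen : s.toList.length ≤ i) :
    PySem.Str.slice s (some a) none = PySem.Str.slice s (some a) (some (i : Int)) := by
  apply String.toList_inj.mp
  simp only [pysem]
  rw [PySem.List.slice_from s.toList ha, PySem.List.slice_toNat s.toList ha (by omega : (0:Int) ≤ (i:Int))]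
  refine (List.take_of_length_le ?_).symm
  simp only [List.length_drop]
  omega

lemma pvMain (s : String) : ∀ (tl : List Char) (i : Nat) (lvl sp : Int) (cur : List Char) (acc : List String),
    s.toList.drop i = tl → -1 ≤ sp → sp + 1 ≤ (i : Int) →
    (PySem.Str.slice s (some (sp + 1)) (some (i : Int))).toList = cur →
    ((PySem.List.enumerate tl (i : Int)).foldl (pvStepA s) (lvl, sp, acc)).2.2
      ++ [PySem.Str.strip (PySem.Str.slice s
            (some (((PySem.List.enumerate tl (i : Int)).foldl (pvStepA s) (lvl, sp, acc)).2.1 + 1)) none)]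
    = acc ++ pvGoB lvl cur tl := by
  intro tl
  induction tl with
  | nil =>
    intro i lvl sp cur acc hdrop hsp hspi hcur
    have hlen : s.toList.length ≤ i := by
      have := congrArg List.length hdrop
      simp only [List.length_drop, List.length_nil] at this
      omega
    have hend : PySem.Str.slice s (some (sp + 1)) none = String.ofList cur := by
      rw [pvSliceEnd s (sp + 1) i (by omega) hlen]
      apply String.toList_inj.mp
      rw [String.toList_ofList]
      exact hcur
    simp [pvGoB, hend]
  | cons c rest ih =>
    intro i lvl sp cur acc hdrop hsp hspi hcur
    have hdrop' : s.toList.drop (i + 1) = rest := by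
      rw [← List.tail_drop, hdrop]; rfl
    rw [PySem.List.enumerate_cons]
    simp only [List.foldl_cons, pvStepA, pvGoB]
    by_cases h : c = ',' ∧ (if c = '[' then lvl + 1 else if c = ']' then lvl - 1 else lvl) = 0
    · simp only [if_pos h]
      have hih := ih (i + 1) (if c = '[' then lvl + 1 else if c = ']' then lvl - 1 else lvl)
        (i : Int) [] (acc ++ [PySem.Str.strip (PySem.Str.slice s (some (sp + 1)) (some (i : Int)))])
        hdrop' (by omega) (by push_cast; omega)
        (by push_cast; exact pvSliceEmpty s ((i : Int) + 1) (by omega))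
      push_cast at hih
      rw [hih]
      have hseg : PySem.Str.slice s (some (sp + 1)) (some (i : Int)) = String.ofList cur := by
        apply String.toList_inj.mp
        rw [String.toList_ofList]
        exact hcur
      simp [hseg]
    · simp only [if_neg h]
      have hih := ih (i + 1) (if c = '[' then lvl + 1 else if c = ']' then lvl - 1 else lvl)
        sp (cur ++ [c]) acc hdrop' hsp (by push_cast; omega)
        (by push_cast
            rw [pvSliceExtend s (sp + 1) i c rest hdrop (by omega) (by omega)]
            rw [hcur])
      push_cast at hih
      exact hih

-- ===== VERDICT (by name: the statement is the Claim_ definition above) =====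
theorem split_type_arguments_py_spec : Claim_equal_split_type_arguments_py := by
  intro arguments _
  unfold Spec_split_type_arguments_py split_type_arguments_py split_type_arguments_py_alt
  have h := pvMain arguments arguments.toList 0 0 (-1) [] []
  simp only [Int.natCast_zero, List.drop_zero] at h
  exact h trivial (by omega) (by omega) (by simpa using pvSliceEmpty arguments 0 le_rfl)
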